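-- pv_equiv track=rewrite | github.com/Momo89100/oui | github2.py | simulation_migration
-- ===== SOURCE A (Python) =====
-- def embaucher_migrant(categorie, sante_econ):
--     bonus = {"cadre": 120, "ouvrier": 15, "intermediaire": 60}
--     return sante_econ + bonus.get(categorie, 0)
--
-- def simulation_migration(resultats_formation, categorie, sante_depart, mois_migration):
--     resultats_globaux = []
--     for formation in resultats_formation:
--         sante_econ = sante_depart
--         resultats_mois = formation[:]
--         for mois in range(1, mois_migration + 1):
--             sante_econ = embaucher_migrant(categorie, sante_econ)
--             resultats_mois.append(sante_econ)
--         resultat_annuel = resultats_mois[-1] - resultats_mois[len(formation)]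
--         resultats_globaux.append((resultats_mois, resultat_annuel))
--     return resultats_globaux
-- ===== SOURCE B (Python) =====
-- def simulation_migration(resultats_formation, categorie, sante_depart, mois_migration):
--     bonus = {"cadre": 120, "ouvrier": 15, "intermediaire": 60}.get(categorie, 0)
--     tail = [sante_depart + i * bonus for i in range(1, mois_migration + 1)]
--     return [(formation + tail, tail[-1] - tail[0]) for formation in resultats_formation]
-- ===== Notes on version B (the rewrite author's own statement) =====
-- stated objective: faster
-- what changed: Replaces the per-formation accumulating loop and helper call with a bonus looked up once and a single closed-form tail list [sante_depart + i*bonus] plus a shared annual delta tail[-1]-tail[0], computed once and reused for every formation in one comprehension.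
import Mathlib
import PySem

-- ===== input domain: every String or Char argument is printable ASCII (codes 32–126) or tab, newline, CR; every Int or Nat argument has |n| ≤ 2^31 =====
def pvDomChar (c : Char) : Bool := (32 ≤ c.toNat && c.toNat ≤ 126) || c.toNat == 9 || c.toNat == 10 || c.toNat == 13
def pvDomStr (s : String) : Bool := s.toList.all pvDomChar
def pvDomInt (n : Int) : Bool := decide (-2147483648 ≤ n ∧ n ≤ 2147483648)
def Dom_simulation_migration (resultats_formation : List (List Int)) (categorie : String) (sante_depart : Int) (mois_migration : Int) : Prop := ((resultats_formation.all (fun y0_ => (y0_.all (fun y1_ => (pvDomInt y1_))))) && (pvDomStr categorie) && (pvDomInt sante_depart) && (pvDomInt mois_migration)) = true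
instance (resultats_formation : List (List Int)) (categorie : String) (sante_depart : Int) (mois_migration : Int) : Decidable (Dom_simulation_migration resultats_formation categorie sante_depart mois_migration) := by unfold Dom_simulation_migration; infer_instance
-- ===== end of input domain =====

-- B replaces A's per-formation accumulating loop with one bonus lookup, one shared
-- closed-form tail list and one shared annual delta computed once and reused (objective: faster, measured).

-- ===== PORT A =====
def embaucher_migrant (categorie : String) (sante_econ : Int) : Int :=
  let bonus : PySem.Dict String Int :=
    PySem.Dict.ofList [("cadre", 120), ("ouvrier", 15), ("intermediaire", 60)]
  sante_econ + PySem.Dict.getD bonus categorie 0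

def simulation_migration (resultats_formation : List (List Int)) (categorie : String) (sante_depart : Int) (mois_migration : Int) : List (List Int × Int) :=
  resultats_formation.foldl (fun resultats_globaux formation =>
    let st := (PySem.List.pyRange 1 (mois_migration + 1) 1).foldl
      (fun (st : List Int × Int) _mois =>
        let s := embaucher_migrant categorie st.2
        (st.1 ++ [s], s)) (formation, sante_depart)
    let resultats_mois := st.1
    -- the two indexings raise IndexError in Python when mois_migration ≤ 0; Pre_ excludes that
    let resultat_annuel := PySem.List.pyGetD resultats_mois (-1) 0
                         - PySem.List.pyGetD resultats_mois (formation.length : Int) 0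
    resultats_globaux ++ [(resultats_mois, resultat_annuel)]) []

-- ===== PORT B =====
def simulation_migration_alt (resultats_formation : List (List Int)) (categorie : String) (sante_depart : Int) (mois_migration : Int) : List (List Int × Int) :=
  let bonus := PySem.Dict.getD
    (PySem.Dict.ofList [("cadre", 120), ("ouvrier", 15), ("intermediaire", 60)]) categorie 0
  let tail := (PySem.List.pyRange 1 (mois_migration + 1) 1).map (fun i => sante_depart + i * bonus)
  resultats_formation.map (fun formation =>
    (formation ++ tail, PySem.List.pyGetD tail (-1) 0 - PySem.List.pyGetD tail 0 0))

-- ===== PRECONDITION & SPEC =====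
-- A (and B) raise IndexError when mois_migration ≤ 0 and the formation list is nonempty
-- (resultats_mois[len(formation)] is out of range); Pre_ excludes exactly those inputs.
def Pre_simulation_migration (resultats_formation : List (List Int)) (categorie : String) (sante_depart : Int) (mois_migration : Int) : Prop :=
  resultats_formation = [] ∨ 1 ≤ mois_migration
instance (resultats_formation : List (List Int)) (categorie : String) (sante_depart : Int) (mois_migration : Int) : Decidable (Pre_simulation_migration resultats_formation categorie sante_depart mois_migration) := by unfold Pre_simulation_migration; infer_instance

def pvWitness_simulation_migration : List (List Int) × String × Int × Int := ([[1, 2], []], "cadre", 10, 3)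

def Spec_simulation_migration (resultats_formation : List (List Int)) (categorie : String) (sante_depart : Int) (mois_migration : Int) (out : List (List Int × Int)) : Prop := out = simulation_migration_alt resultats_formation categorie sante_depart mois_migration
instance (resultats_formation : List (List Int)) (categorie : String) (sante_depart : Int) (mois_migration : Int) (out : List (List Int × Int)) : Decidable (Spec_simulation_migration resultats_formation categorie sante_depart mois_migration out) := by unfold Spec_simulation_migration; infer_instance

-- ===== CLAIM (what is proved, stated in full; the proofs are below) =====
def Claim_equal_simulation_migration : Prop := ∀ (resultats_formation : List (List Int)) (categorie : String) (sante_depart : Int) (mois_migration : Int), Dom_simulation_migration resultats_formation categorie sante_depart mois_migration → Pre_simulation_migration resultats_formation categorie sante_depart mois_migration → Spec_simulation_migration resultats_formation categorie sante_depart mois_migration (simulation_migration resultats_formation categorie sante_depart mois_migration)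

-- ===== LEMMAS AND PROOFS =====

-- A's inner loop over range(1, n+1): accumulating sante_econ and appending on each step
-- produces exactly formation ++ the closed-form tail, with final health sd + n*bonus.
lemma inner_loop_eq (cat : String) (sd : Int) (n : Nat) (fs : List Int) :
    (PySem.List.pyRange 1 ((n : Int) + 1) 1).foldl
      (fun (st : List Int × Int) _mois =>
        let s := embaucher_migrant cat st.2
        (st.1 ++ [s], s)) (fs, sd)
    = (fs ++ (PySem.List.pyRange 1 ((n : Int) + 1) 1).map
        (fun i => sd + i * PySem.Dict.getD (PySem.Dict.ofList [("cadre", 120), ("ouvrier", 15), ("intermediaire", 60)]) cat 0),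
       sd + (n : Int) * PySem.Dict.getD (PySem.Dict.ofList [("cadre", 120), ("ouvrier", 15), ("intermediaire", 60)]) cat 0) := by
  induction n with
  | zero =>
      have h0 : PySem.List.pyRange 1 (((0:Nat):Int) + 1) 1 = [] := PySem.List.pyRange_one_eq_nil (by norm_num)
      rw [h0]; simp
  | succ k ih =>
      have h1 : (1:Int) ≤ (k : Int) + 1 := by omega
      have h2 : ((k : Int) + 1) ≤ ((k + 1 : Nat) : Int) + 1 := by push_cast; omega
      have hsplit := PySem.List.pyRange_one_append 1 ((k : Int) + 1) (((k + 1 : Nat) : Int) + 1) h1 h2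
      have hsing : PySem.List.pyRange ((k : Int) + 1) (((k + 1 : Nat) : Int) + 1) 1 = [(k : Int) + 1] := by
        have h3 : (((k + 1 : Nat) : Int) + 1) = ((k : Int) + 1) + 1 := by push_cast; ring
        rw [h3, PySem.List.pyRange_one_singleton]
      rw [hsplit, hsing, List.foldl_append, ih, List.map_append]
      simp only [List.foldl_cons, List.foldl_nil, List.map_cons, List.map_nil, Prod.mk.injEq]
      constructor
      · rw [List.append_assoc]
        congr 2
        simp [embaucher_migrant]; ring
      · simp [embaucher_migrant]; ring

-- the same with the bound written as an Int mm ≥ 1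
lemma inner_loop_eq' (cat : String) (sd mm : Int) (hmm : 1 ≤ mm) (fs : List Int) :
    (PySem.List.pyRange 1 (mm + 1) 1).foldl
      (fun (st : List Int × Int) _mois =>
        let s := embaucher_migrant cat st.2
        (st.1 ++ [s], s)) (fs, sd)
    = (fs ++ (PySem.List.pyRange 1 (mm + 1) 1).map
        (fun i => sd + i * PySem.Dict.getD (PySem.Dict.ofList [("cadre", 120), ("ouvrier", 15), ("intermediaire", 60)]) cat 0),
       sd + mm * PySem.Dict.getD (PySem.Dict.ofList [("cadre", 120), ("ouvrier", 15), ("intermediaire", 60)]) cat 0) := by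
  have h : mm = (mm.toNat : Int) := by omega
  rw [h]
  exact inner_loop_eq cat sd mm.toNat fs

lemma tail_ne_nil (sd b mm : Int) (hmm : 1 ≤ mm) :
    (PySem.List.pyRange 1 (mm + 1) 1).map (fun i => sd + i * b) ≠ [] := by
  have h : (1:Int) < mm + 1 := by omega
  rw [PySem.List.pyRange_one_cons h]
  simp

theorem simulation_migration_spec : Claim_equal_simulation_migration := by
  intro rf cat sd mm _hdom hpre
  unfold Spec_simulation_migration
  rcases hpre with h | hmm
  · subst h; rfl
  · unfold simulation_migration simulation_migration_alt
    rw [PySem.List.foldl_append_singleton_eq_map]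
    apply List.map_congr_left
    intro f _hf
    simp only
    rw [inner_loop_eq' cat sd mm hmm f]
    simp only [Prod.mk.injEq]
    have htne := tail_ne_nil sd (PySem.Dict.getD (PySem.Dict.ofList [("cadre", 120), ("ouvrier", 15), ("intermediaire", 60)]) cat 0) mm hmm
    refine ⟨trivial, ?_⟩
    congr 1
    · rw [PySem.List.pyGetD_neg_one _ 0 (by simp [htne]), PySem.List.pyGetD_neg_one _ 0 htne,
          List.getLast_append_of_ne_nil _ htne]
    · rw [PySem.List.pyGetD_natCast, PySem.List.pyGetD_zero]
      unfold List.getD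
      rw [List.getElem?_append_right (by omega), Nat.sub_self]
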